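-- pv_equiv track=rewrite | github.com/mateosi98/Unknotting-Braids | code/pure.py | braid_to_e1
-- ===== SOURCE A (Python) =====
-- def braid_to_e1(braid, number_of_rows):
--   e1 = []
--   for row_number in range(1, number_of_rows+1):
--     row = []
--     for crossing in braid:
--       if abs(crossing) == row_number:
--         if crossing > 0:
--           row.append(1)
--         else:
--           row.append(1)
--       else:
--         row.append(0)
--     e1.append(row)
--   return e1
-- ===== SOURCE B (Python) =====
-- def braid_to_e1(braid, number_of_rows):
--   e1 = [[0] * len(braid) for _ in range(number_of_rows)]
--   for col, crossing in enumerate(braid):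
--     r = abs(crossing)
--     if 1 <= r <= number_of_rows:
--       e1[r - 1][col] = 1
--   return e1
-- ===== Notes on version B (the rewrite author's own statement) =====
-- stated objective: faster
-- what changed: B preallocates the zero matrix and makes a single scatter pass over enumerate(braid), writing each crossing directly into its target row, instead of A's rescan of the whole braid for every row.
import Mathlib
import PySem

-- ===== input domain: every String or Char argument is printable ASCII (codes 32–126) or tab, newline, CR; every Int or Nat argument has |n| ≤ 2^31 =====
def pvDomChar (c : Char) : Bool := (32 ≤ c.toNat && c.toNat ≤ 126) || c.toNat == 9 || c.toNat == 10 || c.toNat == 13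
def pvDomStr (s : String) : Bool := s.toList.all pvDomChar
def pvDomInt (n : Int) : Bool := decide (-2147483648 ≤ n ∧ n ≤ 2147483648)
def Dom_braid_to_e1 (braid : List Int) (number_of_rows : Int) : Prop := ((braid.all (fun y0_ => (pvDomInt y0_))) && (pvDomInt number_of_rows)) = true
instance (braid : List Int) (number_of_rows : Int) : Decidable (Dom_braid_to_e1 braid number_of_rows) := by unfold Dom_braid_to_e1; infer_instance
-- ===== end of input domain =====

-- B preallocates the zero matrix and scatters each crossing into its target row in one pass (fewer per-cell comparisons).
-- ===== PORT A =====
def braid_to_e1 (braid : List Int) (number_of_rows : Int) : List (List Int) :=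
  (PySem.List.pyRange 1 (number_of_rows + 1) 1).foldl (fun e1 row_number =>
    e1 ++ [braid.foldl (fun row crossing =>
      row ++ [if |crossing| = row_number then (if crossing > 0 then (1 : Int) else 1) else 0]) []]) []

-- ===== PORT B =====
def braid_to_e1_alt (braid : List Int) (number_of_rows : Int) : List (List Int) :=
  let init := (PySem.List.pyRange 0 number_of_rows 1).map (fun _ => List.replicate braid.length (0 : Int))
  (PySem.List.enumerate braid 0).foldl (fun e1 p =>
    let r := |p.2|
    if 1 ≤ r ∧ r ≤ number_of_rows then
      e1.modify (r - 1).toNat (fun row => row.set p.1.toNat 1)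
    else e1) init

-- ===== PRECONDITION & SPEC =====
def Spec_braid_to_e1 (braid : List Int) (number_of_rows : Int) (out : List (List Int)) : Prop := out = braid_to_e1_alt braid number_of_rows
instance (braid : List Int) (number_of_rows : Int) (out : List (List Int)) : Decidable (Spec_braid_to_e1 braid number_of_rows out) := by unfold Spec_braid_to_e1; infer_instance

-- ===== CLAIM (what is proved, stated in full; the proofs are below) =====
def Claim_equal_braid_to_e1 : Prop := ∀ (braid : List Int) (number_of_rows : Int), Dom_braid_to_e1 braid number_of_rows → Spec_braid_to_e1 braid number_of_rows (braid_to_e1 braid number_of_rows)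

-- ===== LEMMAS AND PROOFS =====

-- ===== VERDICT (by name: the statement is the Claim_ definition above) =====
-- scatter step of B, named for the proofs (definitionally the fold body of braid_to_e1_alt)
def pvStep (n : Int) (e1 : List (List Int)) (p : Int × Int) : List (List Int) :=
  if 1 ≤ |p.2| ∧ |p.2| ≤ n then e1.modify (|p.2| - 1).toNat (fun row => row.set p.1.toNat 1) else e1

-- the common closed form both ports are brought to
def pvM (braid : List Int) (n : Int) : List (List Int) :=
  (PySem.List.pyRange 1 (n + 1) 1).map (fun r => braid.map (fun c => if |c| = r then (1 : Int) else 0))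

lemma pvStep_length (n : Int) (e1 : List (List Int)) (p : Int × Int) :
    (pvStep n e1 p).length = e1.length := by
  unfold pvStep; split <;> simp

lemma pvStep_rowlen (n : Int) (e1 : List (List Int)) (p : Int × Int) (L : Nat)
    (H : ∀ row ∈ e1, row.length = L) : ∀ row ∈ pvStep n e1 p, row.length = L := by
  unfold pvStep
  split
  · intro row hrow
    obtain ⟨k, hk, rfl⟩ := List.mem_iff_getElem.mp hrow
    rw [List.getElem_modify]
    split
    · rw [List.length_set]
      exact H _ (List.getElem_mem _)
    · exact H _ (List.getElem_mem _)
  · exact H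

lemma pvScatter_length (n : Int) (items : List (Int × Int)) (e1 : List (List Int)) :
    (items.foldl (pvStep n) e1).length = e1.length := by
  induction items generalizing e1 with
  | nil => rfl
  | cons p items ih => rw [List.foldl_cons, ih, pvStep_length]

lemma pvScatter_rowlen (n : Int) (items : List (Int × Int)) (e1 : List (List Int)) (L : Nat)
    (H : ∀ row ∈ e1, row.length = L) : ∀ row ∈ items.foldl (pvStep n) e1, row.length = L := by
  induction items generalizing e1 with
  | nil => exact H
  | cons p items ih => exact ih _ (pvStep_rowlen n e1 p L H)

lemma pvStep_entry (n : Int) (e1 : List (List Int)) (p : Int × Int) (L i j : Nat)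
    (Hlen : e1.length = n.toNat) (H : ∀ row ∈ e1, row.length = L) (hj : j < L) (hp : 0 ≤ p.1) :
    ((pvStep n e1 p).getD i []).getD j 0 =
      if p.1 = (j : Int) ∧ 1 ≤ |p.2| ∧ |p.2| ≤ n ∧ (|p.2| - 1).toNat = i then 1
      else (e1.getD i []).getD j 0 := by
  unfold pvStep
  by_cases hg : 1 ≤ |p.2| ∧ |p.2| ≤ n
  · rw [if_pos hg]
    have htgt : (|p.2| - 1).toNat < e1.length := by rw [Hlen]; omega
    by_cases hi : (|p.2| - 1).toNat = i
    · -- the targeted row is row i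
      have hi' : i < e1.length := hi ▸ htgt
      have hrowlen : (e1[i]'hi').length = L := H _ (List.getElem_mem _)
      have h1 : ((e1.modify (|p.2| - 1).toNat (fun row => row.set p.1.toNat 1)).getD i []) =
          (e1[i]'hi').set p.1.toNat 1 := by
        rw [List.getD_eq_getElem _ [] (show i < (e1.modify (|p.2| - 1).toNat
              (fun row => row.set p.1.toNat 1)).length by simpa using hi')]
        rw [List.getElem_modify, if_pos hi]
      rw [h1]
      have h2 : e1.getD i [] = e1[i]'hi' := List.getD_eq_getElem _ [] hi'
      by_cases hcol : p.1 = (j : Int)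
      · have hpj : p.1.toNat = j := by omega
        rw [hpj, if_pos ⟨hcol, hg.1, hg.2, hi⟩]
        rw [List.getD_eq_getElem _ (0 : Int) (show j < ((e1[i]'hi').set j 1).length by
              rw [List.length_set, hrowlen]; exact hj)]
        rw [List.getElem_set, if_pos rfl]
      · have hne : p.1.toNat ≠ j := by omega
        rw [if_neg (by rintro ⟨h, -⟩; exact hcol h), h2]
        rw [List.getD_eq_getElem _ (0 : Int) (show j < ((e1[i]'hi').set p.1.toNat 1).length by
              rw [List.length_set, hrowlen]; exact hj)]
        rw [List.getD_eq_getElem _ (0 : Int) (show j < (e1[i]'hi').length by rw [hrowlen]; exact hj)]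
        rw [List.getElem_set, if_neg hne]
    · -- a different row is targeted: row i is unchanged
      rw [if_neg (by rintro ⟨-, -, -, h⟩; exact hi h)]
      by_cases hi' : i < e1.length
      · have hm : i < (e1.modify (|p.2| - 1).toNat (fun row => row.set p.1.toNat 1)).length := by
          simpa using hi'
        rw [List.getD_eq_getElem _ [] hm, List.getElem_modify, if_neg hi,
            List.getD_eq_getElem _ [] hi']
      · rw [List.getD_eq_default _ [] (by simpa using Nat.le_of_not_lt hi'),
            List.getD_eq_default _ [] (Nat.le_of_not_lt hi')]
  · rw [if_neg hg, if_neg (by rintro ⟨-, h1, h2, -⟩; exact hg ⟨h1, h2⟩)]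

lemma pvScatter_entry (n : Int) (items : List (Int × Int)) (e1 : List (List Int)) (L i j : Nat)
    (Hlen : e1.length = n.toNat) (H : ∀ row ∈ e1, row.length = L) (hj : j < L)
    (hpos : ∀ p ∈ items, 0 ≤ p.1) :
    ((items.foldl (pvStep n) e1).getD i []).getD j 0 =
      if items.any (fun p => decide (p.1 = (j : Int) ∧ 1 ≤ |p.2| ∧ |p.2| ≤ n ∧ (|p.2| - 1).toNat = i))
      then 1 else (e1.getD i []).getD j 0 := by
  induction items generalizing e1 with
  | nil => simp
  | cons p items ih =>
    rw [List.foldl_cons, List.any_cons]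
    rw [ih (pvStep n e1 p) (by rw [pvStep_length]; exact Hlen) (pvStep_rowlen n e1 p L H)
        (fun q hq => hpos q (List.mem_cons_of_mem _ hq))]
    rw [pvStep_entry n e1 p L i j Hlen H hj (hpos p (List.mem_cons_self ..))]
    by_cases h1 : p.1 = (j : Int) ∧ 1 ≤ |p.2| ∧ |p.2| ≤ n ∧ (|p.2| - 1).toNat = i
    · rw [if_pos h1]
      simp [h1]
    · rw [if_neg h1, decide_eq_false h1, Bool.false_or]

lemma pvA_eq (braid : List Int) (n : Int) : braid_to_e1 braid n = pvM braid n := by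
  unfold braid_to_e1 pvM
  rw [PySem.List.foldl_append_singleton_eq_map, List.nil_append]
  apply List.map_congr_left
  intro r _
  rw [PySem.List.foldl_append_singleton_eq_map, List.nil_append]
  apply List.map_congr_left
  intro c _
  by_cases h : |c| = r <;> simp [h]

lemma pvB_eq (braid : List Int) (n : Int) : braid_to_e1_alt braid n = pvM braid n := by
  have hshow : braid_to_e1_alt braid n = (PySem.List.enumerate braid 0).foldl (pvStep n)
      ((PySem.List.pyRange 0 n 1).map (fun _ => List.replicate braid.length (0 : Int))) := rfl
  set init := (PySem.List.pyRange 0 n 1).map (fun _ => List.replicate braid.length (0 : Int)) with hinit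
  have Hlen : init.length = n.toNat := by
    rw [hinit, List.length_map, PySem.List.length_pyRange_one]; omega
  have Hrow : ∀ row ∈ init, row.length = braid.length := by
    intro row hrow
    rw [hinit] at hrow
    obtain ⟨_, _, rfl⟩ := List.mem_map.mp hrow
    exact List.length_replicate
  have hpos : ∀ p ∈ PySem.List.enumerate braid 0, 0 ≤ p.1 := by
    intro p hp
    obtain ⟨k, hk, rfl⟩ := (PySem.List.mem_enumerate_iff _ _ _).mp hp
    simp
  rw [hshow]
  apply List.ext_getElem
  · rw [pvScatter_length, Hlen]
    simp only [pvM, List.length_map, PySem.List.length_pyRange_one]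
    omega
  · intro i hiL hiR
    have hi : i < n.toNat := by rwa [pvScatter_length, Hlen] at hiL
    have hMrow : (pvM braid n)[i]'hiR = braid.map (fun c => if |c| = 1 + (i : Int) then (1 : Int) else 0) := by
      simp only [pvM]
      rw [List.getElem_map, PySem.List.getElem_pyRange_one]
    rw [hMrow]
    apply List.ext_getElem
    · rw [List.length_map]
      exact pvScatter_rowlen n _ init braid.length Hrow _ (List.getElem_mem _)
    · intro j hjL hjR
      have hj : j < braid.length := by rwa [List.length_map] at hjR
      have hL : ((PySem.List.enumerate braid 0).foldl (pvStep n) init)[i]'hiL =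
          ((PySem.List.enumerate braid 0).foldl (pvStep n) init).getD i [] :=
        (List.getD_eq_getElem _ _ _).symm
      rw [List.getElem_map]
      have hrowlen : (((PySem.List.enumerate braid 0).foldl (pvStep n) init)[i]'hiL).length = braid.length :=
        pvScatter_rowlen n _ init braid.length Hrow _ (List.getElem_mem _)
      have hL2 : (((PySem.List.enumerate braid 0).foldl (pvStep n) init)[i]'hiL)[j]'hjL =
          (((PySem.List.enumerate braid 0).foldl (pvStep n) init).getD i []).getD j 0 := by
        rw [← hL, List.getD_eq_getElem _ (0 : Int) (show j <
            ((((PySem.List.enumerate braid 0).foldl (pvStep n) init))[i]'hiL).length by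
              rw [hrowlen]; exact hj)]
      rw [hL2]
      rw [pvScatter_entry n _ init braid.length i j Hlen Hrow hj hpos]
      have hinit0 : (init.getD i []).getD j 0 = 0 := by
        rw [List.getD_eq_getElem init [] (show i < init.length by rw [Hlen]; exact hi)]
        simp [hinit]
      rw [hinit0]
      have hany : ((PySem.List.enumerate braid 0).any
          (fun p => decide (p.1 = (j : Int) ∧ 1 ≤ |p.2| ∧ |p.2| ≤ n ∧ (|p.2| - 1).toNat = i)) = true)
          ↔ |braid[j]'hj| = 1 + (i : Int) := by
        rw [List.any_eq_true]
        constructor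
        · rintro ⟨p, hp, hpred⟩
          obtain ⟨k, hk, rfl⟩ := (PySem.List.mem_enumerate_iff _ _ _).mp hp
          rw [decide_eq_true_eq] at hpred
          dsimp only at hpred
          obtain ⟨h1, h2, h3, h4⟩ := hpred
          have hkj : k = j := by omega
          subst hkj
          omega
        · intro hc
          refine ⟨((j : Int), braid[j]'hj), ?_, ?_⟩
          · rw [PySem.List.mem_enumerate_iff]
            exact ⟨j, hj, by simp⟩
          · rw [decide_eq_true_eq]
            dsimp only
            have := abs_nonneg (braid[j]'hj)
            exact ⟨rfl, by omega, by omega, by omega⟩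
      by_cases hc : |braid[j]'hj| = 1 + (i : Int)
      · rw [if_pos (hany.mpr hc), if_pos hc]
      · rw [if_neg (fun h => hc (hany.mp h)), if_neg hc]

theorem braid_to_e1_spec : Claim_equal_braid_to_e1 := by
  intro braid n _
  unfold Spec_braid_to_e1
  rw [pvA_eq, pvB_eq]
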